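-- pv_equiv track=rewrite | github.com/groutr/conda-tools | src/conda_tools/environment/history.py | pretty_diff
-- ===== SOURCE A (Python) =====
-- def dist2pair(dist):
--     dist = str(dist)
--     if dist.endswith(']'):
--         dist = dist.split('[', 1)[0]
--     if dist.endswith('.tar.bz2'):
--         dist = dist[:-8]
--     parts = dist.split('::', 1)
--     return 'defaults' if len(parts) < 2 else parts[0], parts[-1]
--
-- def dist2quad(dist):
--     channel, dist = dist2pair(dist)
--     parts = dist.rsplit('-', 2) + ['', '']
--     return (parts[0], parts[1], parts[2], channel)
--
-- def pretty_diff(diff):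
--     added = {}
--     removed = {}
--     for s in diff:
--         fn = s[1:]
--         name, version, _, channel = dist2quad(fn)
--         if channel != 'defaults':
--             version += ' (%s)' % channel
--         if s.startswith('-'):
--             removed[name.lower()] = version
--         elif s.startswith('+'):
--             added[name.lower()] = version
--     changed = set(added) & set(removed)
--     for name in sorted(changed):
--         yield ' %s  {%s -> %s}' % (name, removed[name], added[name])
--     for name in sorted(set(removed) - changed):
--         yield '-%s-%s' % (name, removed[name])
--     for name in sorted(set(added) - changed):
--         yield '+%s-%s' % (name, added[name])
-- ===== SOURCE B (Python) =====
-- def dist2pair(dist):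
--     dist = str(dist)
--     if dist.endswith(']'):
--         dist = dist.split('[', 1)[0]
--     if dist.endswith('.tar.bz2'):
--         dist = dist[:-8]
--     parts = dist.split('::', 1)
--     return 'defaults' if len(parts) < 2 else parts[0], parts[-1]
--
-- def dist2quad(dist):
--     channel, dist = dist2pair(dist)
--     parts = dist.rsplit('-', 2) + ['', '']
--     return (parts[0], parts[1], parts[2], channel)
--
-- def pretty_diff(diff):
--     # sort-based group-by: no dicts/sets; records (name, sign, index, version),
--     # one lexicographic sort, then a single stateful scan that aggregates each
--     # name's group (last '+' and last '-' win) and routes its line to a bucket.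
--     recs = []
--     for i, s in enumerate(diff):
--         sign = s[:1]
--         if sign == '-' or sign == '+':
--             name, version, _, channel = dist2quad(s[1:])
--             if channel != 'defaults':
--                 version = '%s (%s)' % (version, channel)
--             recs.append((name.lower(), sign, i, version))
--     recs.sort(key=lambda r: (r[0], (r[1], r[2])))
--     changed, minus, plus = [], [], []
--     cur, lp, lm = None, None, None
--     def flush():
--         if lp is not None and lm is not None:
--             changed.append(' %s  {%s -> %s}' % (cur, lm, lp))
--         elif lm is not None:
--             minus.append('-%s-%s' % (cur, lm))
--         elif lp is not None:
--             plus.append('+%s-%s' % (cur, lp))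
--     for name, sign, _, version in recs:
--         if name != cur:
--             flush()
--             cur, lp, lm = name, None, None
--         if sign == '+':
--             lp = version
--         else:
--             lm = version
--     flush()
--     yield from changed
--     yield from minus
--     yield from plus
-- ===== Notes on version B (the rewrite author's own statement) =====
-- stated objective: alternative
-- what changed: B drops A's hash-bucketing into two dicts and its three set-algebra sorted passes entirely: it builds a flat list of (name, sign, index, version) records, sorts it once lexicographically, and a single stateful group-by scan aggregates each name's group (last '+'/'-' record wins) and routes its formatted line into the changed/removed/added bucket.
import Mathlib
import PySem

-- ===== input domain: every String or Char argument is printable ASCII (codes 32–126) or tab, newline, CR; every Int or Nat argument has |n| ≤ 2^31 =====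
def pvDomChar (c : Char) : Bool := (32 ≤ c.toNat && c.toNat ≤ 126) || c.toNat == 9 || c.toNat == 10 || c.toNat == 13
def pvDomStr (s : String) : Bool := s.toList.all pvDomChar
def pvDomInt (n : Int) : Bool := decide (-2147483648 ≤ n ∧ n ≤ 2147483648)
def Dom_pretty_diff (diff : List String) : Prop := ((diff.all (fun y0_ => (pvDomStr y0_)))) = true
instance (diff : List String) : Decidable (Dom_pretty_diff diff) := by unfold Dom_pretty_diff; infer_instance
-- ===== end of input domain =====

-- B drops A's two hash dicts and three set-algebra sorted passes for one list of
-- (name, sign, index, version) records, a single lexicographic sort, and one group-by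
-- scan; objective: alternative decomposition, same output. Both are generators in
-- Python; each is modelled by the list of yielded strings.

-- ===== PORT A =====
-- s.rsplit(sep, m) for nonempty sep, ported by hand (no PySem rsplit): reverse, left-split, un-reverse — exact.
def pyRsplit (s : String) (sep : String) (m : Int) : List String :=
  (((PySem.Str.splitMax? (String.ofList s.toList.reverse) (String.ofList sep.toList.reverse) m).getD
      []).map (fun p => String.ofList p.toList.reverse)).reverse

def dist2pair (dist : String) : String × String :=
  let dist := if PySem.Str.endswith dist "]" then
      (((PySem.Str.splitMax? dist "[" 1).getD []).headD "") else dist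
  let dist := if PySem.Str.endswith dist ".tar.bz2" then
      PySem.Str.slice dist none (some (-8)) else dist
  let parts := (PySem.Str.splitMax? dist "::" 1).getD []
  ((if parts.length < 2 then "defaults" else parts.headD ""), parts.getLastD "")

def dist2quad (dist : String) : String × String × String × String :=
  let cd := dist2pair dist
  let parts := pyRsplit cd.2 "-" 2 ++ ["", ""]
  (parts.headD "", parts.getD 1 "", parts.getD 2 "", cd.1)

-- the body of A's parsing/bucketing loop; state = (added, removed)
def pdStep (acc : PySem.Dict String String × PySem.Dict String String) (s : String) :
    PySem.Dict String String × PySem.Dict String String :=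
  let fn := PySem.Str.slice s (some 1) none
  let q := dist2quad fn
  let name := q.1
  let version := q.2.1
  let channel := q.2.2.2
  let version := if channel ≠ "defaults" then version ++ " (" ++ channel ++ ")" else version
  if PySem.Str.startswith s "-" then (acc.1, acc.2.insert (PySem.Str.lower name) version)
  else if PySem.Str.startswith s "+" then (acc.1.insert (PySem.Str.lower name) version, acc.2)
  else acc

-- ' %s  {%s -> %s}' % (name, removed[name], added[name]); the lookups are over present keys, getD "" is exact there
def fmtChanged (added removed : PySem.Dict String String) (name : String) : String :=
  " " ++ name ++ "  {" ++ (removed.get? name).getD "" ++ " -> " ++ (added.get? name).getD "" ++ "}"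
def fmtMinus (removed : PySem.Dict String String) (name : String) : String :=
  "-" ++ name ++ "-" ++ (removed.get? name).getD ""
def fmtPlus (added : PySem.Dict String String) (name : String) : String :=
  "+" ++ name ++ "-" ++ (added.get? name).getD ""

def pretty_diff (diff : List String) : List String :=
  let st := diff.foldl pdStep (PySem.Dict.empty, PySem.Dict.empty)
  let added := st.1
  let removed := st.2
  let changed := PySem.Set.inter (PySem.Set.ofList added.keys) (PySem.Set.ofList removed.keys)
  (PySem.List.sorted changed (fun x => x) false).map (fmtChanged added removed)
    ++ (PySem.List.sorted (PySem.Set.diff (PySem.Set.ofList removed.keys) changed)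
          (fun x => x) false).map (fmtMinus removed)
    ++ (PySem.List.sorted (PySem.Set.diff (PySem.Set.ofList added.keys) changed)
          (fun x => x) false).map (fmtPlus added)

-- ===== PORT B =====
-- Source B's record-building loop over enumerate(diff): (name, sign, index, version)
def bRecs (diff : List String) : List (String × String × Int × String) :=
  (PySem.List.enumerate diff).foldl (fun recs p =>
    let s := p.2
    let sign := PySem.Str.slice s none (some 1)
    if sign = "-" ∨ sign = "+" then
      let q := dist2quad (PySem.Str.slice s (some 1) none)
      let version := if q.2.2.2 ≠ "defaults" then q.2.1 ++ " (" ++ q.2.2.2 ++ ")" else q.2.1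
      recs ++ [(PySem.Str.lower q.1, sign, p.1, version)]
    else recs) []

-- Source B's flush(): route the finished group's line into its bucket (cur is only
-- formatted when it was set; "None" is Python's '%s' % None, never reached)
def bFlush (cur : Option String) (lp lm : Option String)
    (bs : List String × List String × List String) : List String × List String × List String :=
  let curS := match cur with | some c => c | none => "None"
  match lp, lm with
  | some p, some m => (bs.1 ++ [" " ++ curS ++ "  {" ++ m ++ " -> " ++ p ++ "}"], bs.2.1, bs.2.2)
  | none,  some m => (bs.1, bs.2.1 ++ ["-" ++ curS ++ "-" ++ m], bs.2.2)
  | some p, none  => (bs.1, bs.2.1, bs.2.2 ++ ["+" ++ curS ++ "-" ++ p])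
  | none,  none  => bs

-- Source B's scan body; state = (cur, lp, lm, (changed, minus, plus))
def bStep (st : Option String × Option String × Option String ×
      (List String × List String × List String))
    (r : String × String × Int × String) :
    Option String × Option String × Option String ×
      (List String × List String × List String) :=
  let st := if st.1 ≠ some r.1 then
      (some r.1, none, none, bFlush st.1 st.2.1 st.2.2.1 st.2.2.2) else st
  if r.2.1 = "+" then (st.1, some r.2.2.2, st.2.2.1, st.2.2.2)
  else (st.1, st.2.1, some r.2.2.2, st.2.2.2)

def pretty_diff_alt (diff : List String) : List String :=
  let recs := PySem.List.sorted2 (bRecs diff) (fun r => r.1)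
      (fun r => toLex (r.2.1, r.2.2.1)) false
  let st := recs.foldl bStep (none, none, none, ([], [], []))
  let bs := bFlush st.1 st.2.1 st.2.2.1 st.2.2.2
  bs.1 ++ bs.2.1 ++ bs.2.2

-- ===== PRECONDITION & SPEC =====
def Spec_pretty_diff (diff : List String) (out : List String) : Prop := out = pretty_diff_alt diff
instance (diff : List String) (out : List String) : Decidable (Spec_pretty_diff diff out) := by unfold Spec_pretty_diff; infer_instance

-- ===== CLAIM (what is proved, stated in full; the proofs are below) =====
def Claim_equal_pretty_diff : Prop := ∀ (diff : List String), Dom_pretty_diff diff → Spec_pretty_diff diff (pretty_diff diff)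

-- ===== LEMMAS AND PROOFS =====

-- ---------- proof-side closed forms ----------
def pvSign (s : String) : String := PySem.Str.slice s none (some 1)
def pvIsPM (s : String) : Bool := decide (pvSign s = "-" ∨ pvSign s = "+")
def pvMkRec (i : Int) (s : String) : String × String × Int × String :=
  let q := dist2quad (PySem.Str.slice s (some 1) none)
  let version := if q.2.2.2 ≠ "defaults" then q.2.1 ++ " (" ++ q.2.2.2 ++ ")" else q.2.1
  (PySem.Str.lower q.1, pvSign s, i, version)
def pvRecs (diff : List String) : List (String × String × Int × String) :=
  ((PySem.List.enumerate diff).filter (fun p => pvIsPM p.2)).map (fun p => pvMkRec p.1 p.2)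
def pvPlus (diff : List String) (n : String) : List (String × String × Int × String) :=
  (pvRecs diff).filter (fun r => r.1 == n && r.2.1 == "+")
def pvMinus (diff : List String) (n : String) : List (String × String × Int × String) :=
  (pvRecs diff).filter (fun r => r.1 == n && r.2.1 == "-")
def pvLP (diff : List String) (n : String) : Option String :=
  ((pvPlus diff n).map (fun r => r.2.2.2)).getLast?
def pvLM (diff : List String) (n : String) : Option String :=
  ((pvMinus diff n).map (fun r => r.2.2.2)).getLast?
def pvKey (r : String × String × Int × String) : Lex (String × Lex (String × Int)) :=
  toLex (r.1, toLex (r.2.1, r.2.2.1))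
def pvLastP (l : List (String × String × Int × String)) (o : Option String) : Option String :=
  l.foldl (fun a r => if r.2.1 = "+" then some r.2.2.2 else a) o
def pvLastM (l : List (String × String × Int × String)) (o : Option String) : Option String :=
  l.foldl (fun a r => if r.2.1 = "+" then a else some r.2.2.2) o

-- ---------- sign-prefix compatibility ----------
theorem slice_one (s : String) : pvSign s = String.ofList (s.toList.take 1) := by
  unfold pvSign
  simp only [PySem.Str.slice, PySem.Chars.slice]
  rw [PySem.List.slice_to s.toList (by norm_num)]
  norm_num

theorem startswith_single (s : String) (c : Char) :
    PySem.Str.startswith s (String.ofList [c]) = decide (pvSign s = String.ofList [c]) := by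
  rw [slice_one]
  simp only [PySem.Str.startswith, PySem.Chars.startswith]
  rw [Bool.eq_iff_iff]
  simp only [decide_eq_true_eq, String.ofList_inj]
  cases hs : s.toList with
  | nil => simp [List.isPrefixOf]
  | cons d t =>
    have hof : (String.ofList [c]).toList = [c] := by simp
    rw [hof]
    have hred : ([c].isPrefixOf (d :: t)) = (c == d) := by
      show (c == d && [].isPrefixOf t) = (c == d)
      simp
    rw [hred, List.take_succ_cons, List.take_zero, beq_iff_eq]
    constructor
    · intro h
      rw [← h]
    · intro h
      injection h with h1 _
      exact h1.symm

-- ---------- bRecs closed form ----------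
theorem bRecs_eq (diff : List String) : bRecs diff = pvRecs diff := by
  unfold bRecs pvRecs
  have hfun : (fun (recs : List (String × String × Int × String)) (p : Int × String) =>
      let s := p.2
      let sign := PySem.Str.slice s none (some 1)
      if sign = "-" ∨ sign = "+" then
        let q := dist2quad (PySem.Str.slice s (some 1) none)
        let version := if q.2.2.2 ≠ "defaults" then q.2.1 ++ " (" ++ q.2.2.2 ++ ")" else q.2.1
        recs ++ [(PySem.Str.lower q.1, sign, p.1, version)]
      else recs)
      = (fun recs p => if pvIsPM p.2 = true then recs ++ [pvMkRec p.1 p.2] else recs) := by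
    funext recs p
    simp only [pvIsPM, pvMkRec, pvSign, decide_eq_true_eq]
  rw [hfun]
  simpa using PySem.List.foldl_append_if (fun (q : Int × String) => pvIsPM q.2)
    (fun q => pvMkRec q.1 q.2) (PySem.List.enumerate diff) []

-- ---------- A's dicts vs the record list ----------
theorem pvRecs_append_singleton (t : List String) (s : String) :
    pvRecs (t ++ [s]) = pvRecs t ++ (if pvIsPM s then [pvMkRec t.length s] else []) := by
  unfold pvRecs
  rw [PySem.List.enumerate_append]
  simp only [PySem.List.enumerate_cons, PySem.List.enumerate_nil, List.filter_append, List.map_append]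
  congr 1
  by_cases h : pvIsPM s = true
  · simp [h]
  · simp [h]

theorem startswith_dash (s : String) : PySem.Str.startswith s "-" = decide (pvSign s = "-") := by
  have := startswith_single s '-'
  have h1 : String.ofList ['-'] = "-" := by decide
  rwa [h1] at this

theorem startswith_plus (s : String) : PySem.Str.startswith s "+" = decide (pvSign s = "+") := by
  have := startswith_single s '+'
  have h1 : String.ofList ['+'] = "+" := by decide
  rwa [h1] at this

theorem dict_link (diff : List String) (n : String) :
    (diff.foldl pdStep (PySem.Dict.empty, PySem.Dict.empty)).1.get? n = pvLP diff n ∧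
    (diff.foldl pdStep (PySem.Dict.empty, PySem.Dict.empty)).2.get? n = pvLM diff n := by
  induction diff using List.reverseRecOn with
  | nil => exact ⟨rfl, rfl⟩
  | append_singleton t s ih =>
    obtain ⟨ih1, ih2⟩ := ih
    rw [List.foldl_append, List.foldl_cons, List.foldl_nil]
    have hplus : pvPlus (t ++ [s]) n
        = pvPlus t n ++ (if pvIsPM s then [pvMkRec t.length s] else []).filter
            (fun r => r.1 == n && r.2.1 == "+") := by
      unfold pvPlus; rw [pvRecs_append_singleton, List.filter_append]
    have hminus : pvMinus (t ++ [s]) n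
        = pvMinus t n ++ (if pvIsPM s then [pvMkRec t.length s] else []).filter
            (fun r => r.1 == n && r.2.1 == "-") := by
      unfold pvMinus; rw [pvRecs_append_singleton, List.filter_append]
    have hsign : (pvMkRec t.length s).2.1 = pvSign s := by simp [pvMkRec]
    by_cases hm : pvSign s = "-"
    · have hpm : pvIsPM s = true := by simp [pvIsPM, hm]
      have hstep : pdStep (List.foldl pdStep (PySem.Dict.empty, PySem.Dict.empty) t) s
          = ((List.foldl pdStep (PySem.Dict.empty, PySem.Dict.empty) t).1,
             (List.foldl pdStep (PySem.Dict.empty, PySem.Dict.empty) t).2.insert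
               (pvMkRec t.length s).1 (pvMkRec t.length s).2.2.2) := by
        unfold pdStep
        rw [startswith_dash, hm]
        simp [pvMkRec]
      rw [hstep]
      constructor
      · rw [ih1]
        unfold pvLP
        rw [hplus]
        have : (if pvIsPM s then [pvMkRec t.length s] else []).filter
            (fun r => r.1 == n && r.2.1 == "+") = [] := by
          simp [hpm, hsign, hm]
        rw [this, List.append_nil]
      · unfold pvLM
        rw [hminus]
        by_cases hn : (pvMkRec t.length s).1 = n
        · have : (if pvIsPM s then [pvMkRec t.length s] else []).filter
              (fun r => r.1 == n && r.2.1 == "-") = [pvMkRec t.length s] := by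
            simp [hpm, hsign, hm, hn]
          rw [this, hn, PySem.Dict.get?_insert_self]
          simp
        · have : (if pvIsPM s then [pvMkRec t.length s] else []).filter
              (fun r => r.1 == n && r.2.1 == "-") = [] := by
            simp [hpm, hsign, hm, hn]
          rw [this, List.append_nil, PySem.Dict.get?_insert_of_ne _ _ (fun h => hn h.symm)]
          exact ih2
    · by_cases hp : pvSign s = "+"
      · have hpm : pvIsPM s = true := by simp [pvIsPM, hp]
        have hstep : pdStep (List.foldl pdStep (PySem.Dict.empty, PySem.Dict.empty) t) s
            = ((List.foldl pdStep (PySem.Dict.empty, PySem.Dict.empty) t).1.insert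
                 (pvMkRec t.length s).1 (pvMkRec t.length s).2.2.2,
               (List.foldl pdStep (PySem.Dict.empty, PySem.Dict.empty) t).2) := by
          unfold pdStep
          rw [startswith_dash, startswith_plus, hp]
          simp [pvMkRec]
        rw [hstep]
        constructor
        · unfold pvLP
          rw [hplus]
          by_cases hn : (pvMkRec t.length s).1 = n
          · have : (if pvIsPM s then [pvMkRec t.length s] else []).filter
                (fun r => r.1 == n && r.2.1 == "+") = [pvMkRec t.length s] := by
              simp [hpm, hsign, hp, hn]
            rw [this, hn, PySem.Dict.get?_insert_self]
            simp
          · have : (if pvIsPM s then [pvMkRec t.length s] else []).filter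
                (fun r => r.1 == n && r.2.1 == "+") = [] := by
              simp [hpm, hsign, hp, hn]
            rw [this, List.append_nil, PySem.Dict.get?_insert_of_ne _ _ (fun h => hn h.symm)]
            exact ih1
        · rw [ih2]
          unfold pvLM
          rw [hminus]
          have : (if pvIsPM s then [pvMkRec t.length s] else []).filter
              (fun r => r.1 == n && r.2.1 == "-") = [] := by
            simp [hpm, hsign, hp]
          rw [this, List.append_nil]
      · have hpm : pvIsPM s = false := by simp [pvIsPM, hm, hp]
        have hstep : pdStep (List.foldl pdStep (PySem.Dict.empty, PySem.Dict.empty) t) s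
            = List.foldl pdStep (PySem.Dict.empty, PySem.Dict.empty) t := by
          unfold pdStep
          rw [startswith_dash, startswith_plus]
          simp [hm, hp]
        rw [hstep]
        constructor
        · rw [ih1]; unfold pvLP; rw [hplus]; simp [hpm]
        · rw [ih2]; unfold pvLM; rw [hminus]; simp [hpm]

-- ---------- the routing fold, in closed form ----------
theorem foldl3 (l : List String) (c0 c1 : String → Bool) (f0 f1 f2 : String → String)
    (a b c : List String) :
    l.foldl (fun (acc : List String × List String × List String) n =>
        if c0 n then (acc.1 ++ [f0 n], acc.2.1, acc.2.2)
        else if c1 n then (acc.1, acc.2.1 ++ [f1 n], acc.2.2)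
        else (acc.1, acc.2.1, acc.2.2 ++ [f2 n])) (a, b, c)
    = (a ++ (l.filter c0).map f0,
       b ++ (l.filter (fun n => !c0 n && c1 n)).map f1,
       c ++ (l.filter (fun n => !c0 n && !c1 n)).map f2) := by
  induction l generalizing a b c with
  | nil => simp
  | cons x t ih =>
    by_cases h0 : c0 x
    · simp [h0, ih]
    · by_cases h1 : c1 x
      · simp [h0, h1, ih]
      · simp [h0, h1, ih]

-- a name-sorted list X is the p-filter of the sorted union, whenever X ≈ {x ∈ U | p x}
theorem sorted_eq_filter_sorted (U X : List String) (p : String → Bool)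
    (hU : U.Nodup) (hX : X.Nodup)
    (hmem : ∀ x, x ∈ X ↔ x ∈ U ∧ p x = true) :
    PySem.List.sorted X (fun x => x) false
      = (PySem.List.sorted U (fun x => x) false).filter p := by
  have hperm : (PySem.List.sorted U (fun x => x) false).Perm U := PySem.List.sorted_perm _ _ _
  have hSnodup : (PySem.List.sorted U (fun x => x) false).Nodup := hperm.symm.nodup hU
  have hle : (PySem.List.sorted U (fun x => x) false).Pairwise (fun a b => a ≤ b) :=
    PySem.List.sorted_pairwise _ _
  have hlt : (PySem.List.sorted U (fun x => x) false).Pairwise (fun a b => a < b) := by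
    have := hle.and hSnodup
    exact this.imp (fun h => lt_of_le_of_ne h.1 h.2)
  apply PySem.List.sorted_eq_of_perm_of_pairwise_lt
  · apply (List.perm_ext_iff_of_nodup (hSnodup.filter p) hX).mpr
    intro x
    simp only [List.mem_filter, hperm.mem_iff, hmem]
  · exact hlt.sublist List.filter_sublist

-- ---------- sorted2 = sorted by the lex key ----------
theorem sorted2_eq_sorted_lex (xs : List (String × String × Int × String)) :
    PySem.List.sorted2 xs (fun r => r.1) (fun r => toLex (r.2.1, r.2.2.1)) false
      = PySem.List.sorted xs pvKey false := by
  unfold PySem.List.sorted2 PySem.List.sorted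
  simp only [if_neg (by decide : ¬ (false = true))]
  have hb : (fun (a b : String × String × Int × String) =>
        decide (a.1 < b.1) || (!decide (b.1 < a.1)
          && decide ((toLex (a.2.1, a.2.2.1) : Lex (String × Int)) < toLex (b.2.1, b.2.2.1))))
      = (fun a b => decide (pvKey a < pvKey b)) := by
    funext a b
    rw [Bool.eq_iff_iff]
    simp only [Bool.or_eq_true, Bool.and_eq_true, Bool.not_eq_true', decide_eq_true_eq,
      decide_eq_false_iff_not, pvKey, Prod.Lex.lt_iff, ofLex_toLex]
    constructor
    · rintro (h | ⟨h1, h2⟩)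
      · exact Or.inl h
      · rcases lt_trichotomy a.1 b.1 with h3 | h3 | h3
        · exact Or.inl h3
        · exact Or.inr ⟨h3, h2⟩
        · exact absurd h3 h1
    · rintro (h | ⟨h1, h2⟩)
      · exact Or.inl h
      · exact Or.inr ⟨fun hlt => absurd h1 (ne_of_gt hlt), h2⟩
  rw [hb]

-- ---------- the sorted record list, named ----------
theorem mem_pvPlus (diff : List String) (n : String) (r : String × String × Int × String) :
    r ∈ pvPlus diff n ↔ r ∈ pvRecs diff ∧ r.1 = n ∧ r.2.1 = "+" := by
  unfold pvPlus
  simp [List.mem_filter]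

theorem mem_pvMinus (diff : List String) (n : String) (r : String × String × Int × String) :
    r ∈ pvMinus diff n ↔ r ∈ pvRecs diff ∧ r.1 = n ∧ r.2.1 = "-" := by
  unfold pvMinus
  simp [List.mem_filter]

theorem sign_mem_recs (diff : List String) (r : String × String × Int × String)
    (h : r ∈ pvRecs diff) : r.2.1 = "+" ∨ r.2.1 = "-" := by
  unfold pvRecs at h
  obtain ⟨p, hp, rfl⟩ := List.mem_map.mp h
  have := (List.mem_filter.mp hp).2
  simp only [pvIsPM, decide_eq_true_eq] at this
  have hsg : (pvMkRec p.1 p.2).2.1 = pvSign p.2 := by simp [pvMkRec]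
  rw [hsg]
  tauto

theorem idx_pairwise (diff : List String) :
    (pvRecs diff).Pairwise (fun r r' => r.2.2.1 < r'.2.2.1) := by
  unfold pvRecs
  rw [List.pairwise_map]
  apply List.Pairwise.filter
  have h := PySem.List.pairwise_lt_enumerate diff 0
  apply h.imp
  intro p q hpq
  simpa [pvMkRec] using hpq

theorem mem_U_iff (diff : List String) (n : String) :
    (n ∈ PySem.Set.union
        (PySem.Set.ofList (diff.foldl pdStep (PySem.Dict.empty, PySem.Dict.empty)).1.keys)
        (PySem.Set.ofList (diff.foldl pdStep (PySem.Dict.empty, PySem.Dict.empty)).2.keys))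
      ↔ ((pvLP diff n).isSome = true ∨ (pvLM diff n).isSome = true) := by
  rw [PySem.Set.mem_union, PySem.Set.mem_ofList, PySem.Set.mem_ofList]
  obtain ⟨h1, h2⟩ := dict_link diff n
  constructor
  · rintro (h | h)
    · left
      rw [← h1, Option.isSome_iff_ne_none]
      intro hc
      exact ((PySem.Dict.get?_eq_none_iff_not_mem_keys _ _).mp hc) h
    · right
      rw [← h2, Option.isSome_iff_ne_none]
      intro hc
      exact ((PySem.Dict.get?_eq_none_iff_not_mem_keys _ _).mp hc) h
  · rintro (h | h)
    · left
      by_contra hc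
      rw [← (PySem.Dict.get?_eq_none_iff_not_mem_keys _ _)] at hc
      rw [h1] at hc
      simp [hc] at h
    · right
      by_contra hc
      rw [← (PySem.Dict.get?_eq_none_iff_not_mem_keys _ _)] at hc
      rw [h2] at hc
      simp [hc] at h

theorem perm_flatMap_filter (S : List String) (l : List (String × String × Int × String))
    (hnd : S.Nodup) (hcov : ∀ r ∈ l, r.1 ∈ S) :
    (S.flatMap (fun n => l.filter (fun r => r.1 == n))).Perm l := by
  induction S generalizing l with
  | nil =>
    cases l with
    | nil => simp
    | cons r t => exact absurd (hcov r (List.mem_cons_self)) (by simp)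
  | cons n S' ih =>
    rw [List.flatMap_cons]
    have hrw : ∀ m ∈ S', l.filter (fun r => r.1 == m)
        = (l.filter (fun r => !(r.1 == n))).filter (fun r => r.1 == m) := by
      intro m hm
      rw [List.filter_filter]
      apply List.filter_congr
      intro r _
      by_cases h : r.1 = m
      · have hmn : m ≠ n := by
          rintro rfl
          exact (List.nodup_cons.mp hnd).1 hm
        simp [h, hmn]
      · simp [h]
    rw [List.flatMap_congr hrw]
    have hperm := ih (l.filter (fun r => !(r.1 == n))) (List.nodup_cons.mp hnd).2
      (by
        intro r hr
        have hl := List.mem_filter.mp hr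
        have := hcov r hl.1
        rcases List.mem_cons.mp this with h | h
        · exfalso
          have h2 := hl.2
          simp [h] at h2
        · exact h)
    exact (List.Perm.append_left _ hperm).trans
      (List.filter_append_perm (fun r => r.1 == n) l)

theorem sorted_names_lt (U : List String) (hU : U.Nodup) :
    (PySem.List.sorted U (fun x => x) false).Pairwise (fun a b => a < b) := by
  have hperm : (PySem.List.sorted U (fun x => x) false).Perm U := PySem.List.sorted_perm _ _ _
  have hSnodup : (PySem.List.sorted U (fun x => x) false).Nodup := hperm.symm.nodup hU
  have hle : (PySem.List.sorted U (fun x => x) false).Pairwise (fun a b => a ≤ b) :=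
    PySem.List.sorted_pairwise _ _
  exact (hle.and hSnodup).imp (fun h => lt_of_le_of_ne h.1 h.2)

theorem plus_lt_minus_str : ("+" : String) < "-" := by
  rw [String.lt_iff_toList_lt]; decide

theorem sorted_recs (diff : List String) :
    PySem.List.sorted (pvRecs diff) pvKey false
      = (PySem.List.sorted
            (PySem.Set.union
              (PySem.Set.ofList (diff.foldl pdStep (PySem.Dict.empty, PySem.Dict.empty)).1.keys)
              (PySem.Set.ofList (diff.foldl pdStep (PySem.Dict.empty, PySem.Dict.empty)).2.keys))
            (fun x => x) false).flatMap
          (fun n => pvPlus diff n ++ pvMinus diff n) := by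
  set U := PySem.Set.union
      (PySem.Set.ofList (diff.foldl pdStep (PySem.Dict.empty, PySem.Dict.empty)).1.keys)
      (PySem.Set.ofList (diff.foldl pdStep (PySem.Dict.empty, PySem.Dict.empty)).2.keys) with hU
  have hUnodup : U.Nodup := PySem.Set.nodup_union _ _ (PySem.Set.nodup_ofList _)
  set S := PySem.List.sorted U (fun x => x) false with hS
  have hSperm : S.Perm U := PySem.List.sorted_perm _ _ _
  have hSnodup : S.Nodup := hSperm.symm.nodup hUnodup
  have hSlt : S.Pairwise (fun a b => a < b) := sorted_names_lt U hUnodup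
  have hmemS : ∀ n, n ∈ S ↔ ((pvLP diff n).isSome = true ∨ (pvLM diff n).isSome = true) := by
    intro n
    rw [hSperm.mem_iff, hU]
    exact mem_U_iff diff n
  apply PySem.List.sorted_eq_of_perm_of_pairwise_lt
  · -- permutation
    have hblock : ∀ n ∈ S, (pvPlus diff n ++ pvMinus diff n).Perm
        ((pvRecs diff).filter (fun r => r.1 == n)) := by
      intro n _
      have h1 : pvPlus diff n
          = ((pvRecs diff).filter (fun r => r.1 == n)).filter (fun r => r.2.1 == "+") := by
        rw [List.filter_filter]
        unfold pvPlus
        apply List.filter_congr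
        intro r _
        rw [Bool.and_comm]
      have h2 : pvMinus diff n
          = ((pvRecs diff).filter (fun r => r.1 == n)).filter (fun r => !(r.2.1 == "+")) := by
        rw [List.filter_filter]
        unfold pvMinus
        apply List.filter_congr
        intro r hr
        rcases sign_mem_recs diff r hr with h | h
        · simp [h]
        · simp [h]
      rw [h1, h2]
      exact List.filter_append_perm _ _
    have hcov : ∀ r ∈ pvRecs diff, r.1 ∈ S := by
      intro r hr
      rw [hmemS]
      rcases sign_mem_recs diff r hr with h | h
      · left
        have : r ∈ pvPlus diff r.1 := (mem_pvPlus diff r.1 r).mpr ⟨hr, rfl, h⟩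
        unfold pvLP
        rw [List.getLast?_isSome]
        simp only [ne_eq, List.map_eq_nil_iff]
        intro hc
        rw [hc] at this
        exact absurd this (List.not_mem_nil)
      · right
        have : r ∈ pvMinus diff r.1 := (mem_pvMinus diff r.1 r).mpr ⟨hr, rfl, h⟩
        unfold pvLM
        rw [List.getLast?_isSome]
        simp only [ne_eq, List.map_eq_nil_iff]
        intro hc
        rw [hc] at this
        exact absurd this (List.not_mem_nil)
    exact (List.Perm.flatMap (List.Perm.refl S) hblock).trans
      (perm_flatMap_filter S (pvRecs diff) hSnodup hcov)
  · -- pairwise strict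
    rw [List.pairwise_flatMap]
    constructor
    · intro n _
      rw [List.pairwise_append]
      refine ⟨?_, ?_, ?_⟩
      · have := (idx_pairwise diff).filter (fun r => r.1 == n && r.2.1 == "+")
        apply List.Pairwise.imp_of_mem ?_ this
        intro a b ha hb hab
        have ha' := (mem_pvPlus diff n a).mp ha
        have hb' := (mem_pvPlus diff n b).mp hb
        simp only [pvKey, Prod.Lex.lt_iff, ofLex_toLex]
        right
        refine ⟨ha'.2.1.trans hb'.2.1.symm, ?_⟩
        right
        exact ⟨ha'.2.2.trans hb'.2.2.symm, hab⟩
      · have := (idx_pairwise diff).filter (fun r => r.1 == n && r.2.1 == "-")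
        apply List.Pairwise.imp_of_mem ?_ this
        intro a b ha hb hab
        have ha' := (mem_pvMinus diff n a).mp ha
        have hb' := (mem_pvMinus diff n b).mp hb
        simp only [pvKey, Prod.Lex.lt_iff, ofLex_toLex]
        right
        refine ⟨ha'.2.1.trans hb'.2.1.symm, ?_⟩
        right
        exact ⟨ha'.2.2.trans hb'.2.2.symm, hab⟩
      · intro a ha b hb
        have ha' := (mem_pvPlus diff n a).mp ha
        have hb' := (mem_pvMinus diff n b).mp hb
        simp only [pvKey, Prod.Lex.lt_iff, ofLex_toLex]
        right
        refine ⟨ha'.2.1.trans hb'.2.1.symm, ?_⟩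
        left
        rw [ha'.2.2, hb'.2.2]
        exact plus_lt_minus_str
    · apply hSlt.imp_of_mem
      intro m m' _ _ hlt x hx y hy
      have hxm : x.1 = m := by
        rcases List.mem_append.mp hx with h | h
        · exact ((mem_pvPlus diff m x).mp h).2.1
        · exact ((mem_pvMinus diff m x).mp h).2.1
      have hym : y.1 = m' := by
        rcases List.mem_append.mp hy with h | h
        · exact ((mem_pvPlus diff m' y).mp h).2.1
        · exact ((mem_pvMinus diff m' y).mp h).2.1
      simp only [pvKey, Prod.Lex.lt_iff, ofLex_toLex]
      left
      rw [hxm, hym]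
      exact hlt

-- ---------- scan lemmas ----------
theorem block_fold (l : List (String × String × Int × String)) (n : String)
    (h : ∀ r ∈ l, r.1 = n) (lp lm : Option String)
    (bs : List String × List String × List String) :
    l.foldl bStep (some n, lp, lm, bs) = (some n, pvLastP l lp, pvLastM l lm, bs) := by
  induction l generalizing lp lm with
  | nil => rfl
  | cons r t ih =>
    have hr : r.1 = n := h r List.mem_cons_self
    have hstep : bStep (some n, lp, lm, bs) r
        = if r.2.1 = "+" then (some n, some r.2.2.2, lm, bs)
          else (some n, lp, some r.2.2.2, bs) := by
      unfold bStep
      have hc : ¬ ((some n, lp, lm, bs) : Option String × Option String × Option String ×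
          (List String × List String × List String)).1 ≠ some r.1 := by
        rw [hr]; simp
      rw [if_neg hc]
    rw [List.foldl_cons, hstep]
    by_cases hs : r.2.1 = "+"
    · rw [if_pos hs, ih (fun x hx => h x (List.mem_cons_of_mem _ hx))]
      simp [pvLastP, pvLastM, hs]
    · rw [if_neg hs, ih (fun x hx => h x (List.mem_cons_of_mem _ hx))]
      simp [pvLastP, pvLastM, hs]

theorem group_fold (l : List (String × String × Int × String)) (n : String)
    (hne : l ≠ []) (h : ∀ r ∈ l, r.1 = n) (cur : Option String) (hcur : cur ≠ some n)
    (lp lm : Option String) (bs : List String × List String × List String) :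
    l.foldl bStep (cur, lp, lm, bs)
      = (some n, pvLastP l none, pvLastM l none, bFlush cur lp lm bs) := by
  cases l with
  | nil => exact absurd rfl hne
  | cons r t =>
    have hr : r.1 = n := h r List.mem_cons_self
    have hstep : bStep (cur, lp, lm, bs) r
        = if r.2.1 = "+" then (some n, some r.2.2.2, none, bFlush cur lp lm bs)
          else (some n, none, some r.2.2.2, bFlush cur lp lm bs) := by
      unfold bStep
      have hc : ((cur, lp, lm, bs) : Option String × Option String × Option String ×
          (List String × List String × List String)).1 ≠ some r.1 := by
        rw [hr]; exact hcur
      rw [if_pos hc, hr]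
    rw [List.foldl_cons, hstep]
    by_cases hs : r.2.1 = "+"
    · rw [if_pos hs, block_fold t n (fun x hx => h x (List.mem_cons_of_mem _ hx))]
      simp [pvLastP, pvLastM, hs]
    · rw [if_neg hs, block_fold t n (fun x hx => h x (List.mem_cons_of_mem _ hx))]
      simp [pvLastP, pvLastM, hs]

theorem scan_flat (blk : String → List (String × String × Int × String)) :
    ∀ (S : List String), S.Nodup →
    (∀ n ∈ S, blk n ≠ [] ∧ ∀ r ∈ blk n, r.1 = n) →
    ∀ (cur lp lm : Option String) (bs : List String × List String × List String),
    (∀ n ∈ S, cur ≠ some n) →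
    bFlush ((S.flatMap blk).foldl bStep (cur, lp, lm, bs)).1
        ((S.flatMap blk).foldl bStep (cur, lp, lm, bs)).2.1
        ((S.flatMap blk).foldl bStep (cur, lp, lm, bs)).2.2.1
        ((S.flatMap blk).foldl bStep (cur, lp, lm, bs)).2.2.2
      = S.foldl (fun b n => bFlush (some n) (pvLastP (blk n) none) (pvLastM (blk n) none) b)
          (bFlush cur lp lm bs) := by
  intro S
  induction S with
  | nil => intro _ _ cur lp lm bs _; rfl
  | cons n S' ih =>
    intro hnd hblk cur lp lm bs hcur
    obtain ⟨hne, hnames⟩ := hblk n List.mem_cons_self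
    rw [List.flatMap_cons, List.foldl_append,
      group_fold (blk n) n hne hnames cur (hcur n List.mem_cons_self) lp lm bs]
    have := ih (List.nodup_cons.mp hnd).2
      (fun m hm => hblk m (List.mem_cons_of_mem _ hm))
      (some n) (pvLastP (blk n) none) (pvLastM (blk n) none) (bFlush cur lp lm bs)
      (by
        intro m hm hc
        have : n = m := by injection hc
        exact (List.nodup_cons.mp hnd).1 (this ▸ hm))
    rw [this]
    rfl

theorem lastP_skip (l : List (String × String × Int × String))
    (h : ∀ r ∈ l, r.2.1 ≠ "+") (o : Option String) : pvLastP l o = o := by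
  induction l generalizing o with
  | nil => rfl
  | cons r t ih =>
    unfold pvLastP
    rw [List.foldl_cons, if_neg (h r List.mem_cons_self)]
    exact ih (fun x hx => h x (List.mem_cons_of_mem _ hx)) o

theorem lastM_skip (l : List (String × String × Int × String))
    (h : ∀ r ∈ l, r.2.1 = "+") (o : Option String) : pvLastM l o = o := by
  induction l generalizing o with
  | nil => rfl
  | cons r t ih =>
    unfold pvLastM
    rw [List.foldl_cons, if_pos (h r List.mem_cons_self)]
    exact ih (fun x hx => h x (List.mem_cons_of_mem _ hx)) o

theorem lastP_all (l : List (String × String × Int × String))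
    (h : ∀ r ∈ l, r.2.1 = "+") (o : Option String) :
    pvLastP l o = ((l.map (fun r => r.2.2.2)).getLast?).or o := by
  induction l generalizing o with
  | nil => simp [pvLastP]
  | cons r t ih =>
    unfold pvLastP
    rw [List.foldl_cons, if_pos (h r List.mem_cons_self)]
    rw [show List.foldl (fun a r => if r.2.1 = "+" then some r.2.2.2 else a) (some r.2.2.2) t
        = pvLastP t (some r.2.2.2) from rfl]
    rw [ih (fun x hx => h x (List.mem_cons_of_mem _ hx))]
    rw [List.map_cons, List.getLast?_cons]
    cases hm : (t.map (fun r => r.2.2.2)).getLast? with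
    | none => simp
    | some v => simp

theorem lastM_all (l : List (String × String × Int × String))
    (h : ∀ r ∈ l, r.2.1 ≠ "+") (o : Option String) :
    pvLastM l o = ((l.map (fun r => r.2.2.2)).getLast?).or o := by
  induction l generalizing o with
  | nil => simp [pvLastM]
  | cons r t ih =>
    unfold pvLastM
    rw [List.foldl_cons, if_neg (h r List.mem_cons_self)]
    rw [show List.foldl (fun a r => if r.2.1 = "+" then a else some r.2.2.2) (some r.2.2.2) t
        = pvLastM t (some r.2.2.2) from rfl]
    rw [ih (fun x hx => h x (List.mem_cons_of_mem _ hx))]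
    rw [List.map_cons, List.getLast?_cons]
    cases hm : (t.map (fun r => r.2.2.2)).getLast? with
    | none => simp
    | some v => simp

theorem lastP_block (diff : List String) (n : String) :
    pvLastP (pvPlus diff n ++ pvMinus diff n) none = pvLP diff n := by
  unfold pvLastP
  rw [List.foldl_append]
  rw [show List.foldl (fun a r => if r.2.1 = "+" then some r.2.2.2 else a)
      (List.foldl (fun a r => if r.2.1 = "+" then some r.2.2.2 else a) none (pvPlus diff n))
      (pvMinus diff n)
      = pvLastP (pvMinus diff n) (pvLastP (pvPlus diff n) none) from rfl]
  rw [lastP_skip (pvMinus diff n)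
      (fun r hr => by rw [((mem_pvMinus diff n r).mp hr).2.2]; decide)]
  rw [lastP_all (pvPlus diff n) (fun r hr => ((mem_pvPlus diff n r).mp hr).2.2)]
  rw [Option.or_none]
  rfl

theorem lastM_block (diff : List String) (n : String) :
    pvLastM (pvPlus diff n ++ pvMinus diff n) none = pvLM diff n := by
  unfold pvLastM
  rw [List.foldl_append]
  rw [show List.foldl (fun a r => if r.2.1 = "+" then a else some r.2.2.2)
      (List.foldl (fun a r => if r.2.1 = "+" then a else some r.2.2.2) none (pvPlus diff n))
      (pvMinus diff n)
      = pvLastM (pvMinus diff n) (pvLastM (pvPlus diff n) none) from rfl]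
  rw [lastM_skip (pvPlus diff n) (fun r hr => ((mem_pvPlus diff n r).mp hr).2.2)]
  rw [lastM_all (pvMinus diff n)
      (fun r hr => by rw [((mem_pvMinus diff n r).mp hr).2.2]; decide)]
  rw [Option.or_none]
  rfl

-- ---------- canonical three-bucket form shared by both sides ----------
def pvC0 (diff : List String) (n : String) : Bool :=
  (pvLP diff n).isSome && (pvLM diff n).isSome
def pvC1 (diff : List String) (n : String) : Bool := (pvLM diff n).isSome
def pvF0 (diff : List String) (n : String) : String :=
  " " ++ n ++ "  {" ++ (pvLM diff n).getD "" ++ " -> " ++ (pvLP diff n).getD "" ++ "}"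
def pvF1 (diff : List String) (n : String) : String :=
  "-" ++ n ++ "-" ++ (pvLM diff n).getD ""
def pvF2 (diff : List String) (n : String) : String :=
  "+" ++ n ++ "-" ++ (pvLP diff n).getD ""
def pvS (diff : List String) : List String :=
  PySem.List.sorted
    (PySem.Set.union
      (PySem.Set.ofList (diff.foldl pdStep (PySem.Dict.empty, PySem.Dict.empty)).1.keys)
      (PySem.Set.ofList (diff.foldl pdStep (PySem.Dict.empty, PySem.Dict.empty)).2.keys))
    (fun x => x) false
def pvOut (diff : List String) : List String :=
  ((pvS diff).filter (pvC0 diff)).map (pvF0 diff)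
    ++ ((pvS diff).filter (fun n => !pvC0 diff n && pvC1 diff n)).map (pvF1 diff)
    ++ ((pvS diff).filter (fun n => !pvC0 diff n && !pvC1 diff n)).map (pvF2 diff)

theorem LP_isSome_iff (diff : List String) (n : String) :
    (pvLP diff n).isSome = true ↔ pvPlus diff n ≠ [] := by
  unfold pvLP
  rw [List.getLast?_isSome]
  simp [List.map_eq_nil_iff]

theorem LM_isSome_iff (diff : List String) (n : String) :
    (pvLM diff n).isSome = true ↔ pvMinus diff n ≠ [] := by
  unfold pvLM
  rw [List.getLast?_isSome]
  simp [List.map_eq_nil_iff]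

theorem mem_keys_LP (diff : List String) (n : String) :
    n ∈ (diff.foldl pdStep (PySem.Dict.empty, PySem.Dict.empty)).1.keys
      ↔ (pvLP diff n).isSome = true := by
  obtain ⟨h1, _⟩ := dict_link diff n
  rw [← h1, Option.isSome_iff_ne_none]
  constructor
  · intro h hc
    exact ((PySem.Dict.get?_eq_none_iff_not_mem_keys _ _).mp hc) h
  · intro h
    by_contra hc
    exact h ((PySem.Dict.get?_eq_none_iff_not_mem_keys _ _).mpr hc)

theorem mem_keys_LM (diff : List String) (n : String) :
    n ∈ (diff.foldl pdStep (PySem.Dict.empty, PySem.Dict.empty)).2.keys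
      ↔ (pvLM diff n).isSome = true := by
  obtain ⟨_, h2⟩ := dict_link diff n
  rw [← h2, Option.isSome_iff_ne_none]
  constructor
  · intro h hc
    exact ((PySem.Dict.get?_eq_none_iff_not_mem_keys _ _).mp hc) h
  · intro h
    by_contra hc
    exact h ((PySem.Dict.get?_eq_none_iff_not_mem_keys _ _).mpr hc)

theorem mem_pvS (diff : List String) (n : String) :
    n ∈ pvS diff ↔ ((pvLP diff n).isSome = true ∨ (pvLM diff n).isSome = true) := by
  unfold pvS
  rw [PySem.List.mem_sorted]
  exact mem_U_iff diff n

theorem pvS_nodup (diff : List String) : (pvS diff).Nodup := by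
  unfold pvS
  exact ((PySem.List.sorted_perm _ _ _).symm.nodup
    (PySem.Set.nodup_union _ _ (PySem.Set.nodup_ofList _)))

-- ---------- B = canonical ----------
theorem B_canonical (diff : List String) : pretty_diff_alt diff = pvOut diff := by
  unfold pretty_diff_alt
  dsimp only
  rw [bRecs_eq, sorted2_eq_sorted_lex, sorted_recs]
  have hblk : ∀ n ∈ pvS diff, (pvPlus diff n ++ pvMinus diff n) ≠ [] ∧
      ∀ r ∈ pvPlus diff n ++ pvMinus diff n, r.1 = n := by
    intro n hn
    constructor
    · rcases (mem_pvS diff n).mp hn with h | h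
      · have := (LP_isSome_iff diff n).mp h
        intro hc
        rcases List.append_eq_nil_iff.mp hc with ⟨h1, _⟩
        exact this h1
      · have := (LM_isSome_iff diff n).mp h
        intro hc
        rcases List.append_eq_nil_iff.mp hc with ⟨_, h2⟩
        exact this h2
    · intro r hr
      rcases List.mem_append.mp hr with h | h
      · exact ((mem_pvPlus diff n r).mp h).2.1
      · exact ((mem_pvMinus diff n r).mp h).2.1
  rw [show (PySem.List.sorted
        (PySem.Set.union
          (PySem.Set.ofList (diff.foldl pdStep (PySem.Dict.empty, PySem.Dict.empty)).1.keys)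
          (PySem.Set.ofList (diff.foldl pdStep (PySem.Dict.empty, PySem.Dict.empty)).2.keys))
        (fun x => x) false) = pvS diff from rfl]
  rw [scan_flat (fun n => pvPlus diff n ++ pvMinus diff n) (pvS diff) (pvS_nodup diff) hblk
      none none none ([], [], []) (by intro n _; simp)]
  have hinit : bFlush none none none ([], [], []) = ([], [], []) := rfl
  rw [hinit]
  simp only [lastP_block, lastM_block]
  rw [PySem.List.foldl_congr_mem (pvS diff) _
      (fun (b : List String × List String × List String) n =>
        if pvC0 diff n then (b.1 ++ [pvF0 diff n], b.2.1, b.2.2)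
        else if pvC1 diff n then (b.1, b.2.1 ++ [pvF1 diff n], b.2.2)
        else (b.1, b.2.1, b.2.2 ++ [pvF2 diff n])) ([], [], [])
      (by
        intro b n hn
        rcases hLP : pvLP diff n with _ | p <;> rcases hLM : pvLM diff n with _ | m
        · exfalso
          rcases (mem_pvS diff n).mp hn with h | h
          · rw [hLP] at h; simp at h
          · rw [hLM] at h; simp at h
        · simp [bFlush, pvC0, pvC1, pvF1, hLP, hLM]
        · simp [bFlush, pvC0, pvC1, pvF2, hLP, hLM]
        · simp [bFlush, pvC0, pvF0, hLP, hLM])]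
  rw [foldl3]
  simp only [List.nil_append]
  rfl

-- ---------- A = canonical ----------
theorem A_canonical (diff : List String) : pretty_diff diff = pvOut diff := by
  unfold pretty_diff
  dsimp only
  have e0 : PySem.List.sorted
      (PySem.Set.inter
        (PySem.Set.ofList (diff.foldl pdStep (PySem.Dict.empty, PySem.Dict.empty)).1.keys)
        (PySem.Set.ofList (diff.foldl pdStep (PySem.Dict.empty, PySem.Dict.empty)).2.keys))
      (fun x => x) false = (pvS diff).filter (pvC0 diff) := by
    have := sorted_eq_filter_sorted
      (PySem.Set.union
        (PySem.Set.ofList (diff.foldl pdStep (PySem.Dict.empty, PySem.Dict.empty)).1.keys)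
        (PySem.Set.ofList (diff.foldl pdStep (PySem.Dict.empty, PySem.Dict.empty)).2.keys))
      (PySem.Set.inter
        (PySem.Set.ofList (diff.foldl pdStep (PySem.Dict.empty, PySem.Dict.empty)).1.keys)
        (PySem.Set.ofList (diff.foldl pdStep (PySem.Dict.empty, PySem.Dict.empty)).2.keys))
      (pvC0 diff)
      (PySem.Set.nodup_union _ _ (PySem.Set.nodup_ofList _))
      (PySem.Set.nodup_inter _ _ (PySem.Set.nodup_ofList _))
      (by
        intro x
        simp only [PySem.Set.mem_inter, PySem.Set.mem_union, PySem.Set.mem_ofList,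
          mem_keys_LP, mem_keys_LM, pvC0]
        cases hP : (pvLP diff x).isSome <;> cases hM : (pvLM diff x).isSome <;> simp_all)
    exact this
  have e1 : PySem.List.sorted
      (PySem.Set.diff
        (PySem.Set.ofList (diff.foldl pdStep (PySem.Dict.empty, PySem.Dict.empty)).2.keys)
        (PySem.Set.inter
          (PySem.Set.ofList (diff.foldl pdStep (PySem.Dict.empty, PySem.Dict.empty)).1.keys)
          (PySem.Set.ofList (diff.foldl pdStep (PySem.Dict.empty, PySem.Dict.empty)).2.keys)))
      (fun x => x) false
      = (pvS diff).filter (fun n => !pvC0 diff n && pvC1 diff n) := by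
    apply sorted_eq_filter_sorted _ _ _
      (PySem.Set.nodup_union _ _ (PySem.Set.nodup_ofList _))
      (PySem.Set.nodup_diff _ _ (PySem.Set.nodup_ofList _))
    intro x
    simp only [PySem.Set.mem_diff, PySem.Set.mem_inter, PySem.Set.mem_union,
      PySem.Set.mem_ofList, mem_keys_LP, mem_keys_LM, pvC0, pvC1]
    cases hP : (pvLP diff x).isSome <;> cases hM : (pvLM diff x).isSome <;> simp_all
  have e2 : PySem.List.sorted
      (PySem.Set.diff
        (PySem.Set.ofList (diff.foldl pdStep (PySem.Dict.empty, PySem.Dict.empty)).1.keys)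
        (PySem.Set.inter
          (PySem.Set.ofList (diff.foldl pdStep (PySem.Dict.empty, PySem.Dict.empty)).1.keys)
          (PySem.Set.ofList (diff.foldl pdStep (PySem.Dict.empty, PySem.Dict.empty)).2.keys)))
      (fun x => x) false
      = (pvS diff).filter (fun n => !pvC0 diff n && !pvC1 diff n) := by
    apply sorted_eq_filter_sorted _ _ _
      (PySem.Set.nodup_union _ _ (PySem.Set.nodup_ofList _))
      (PySem.Set.nodup_diff _ _ (PySem.Set.nodup_ofList _))
    intro x
    simp only [PySem.Set.mem_diff, PySem.Set.mem_inter, PySem.Set.mem_union,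
      PySem.Set.mem_ofList, mem_keys_LP, mem_keys_LM, pvC0, pvC1]
    cases hP : (pvLP diff x).isSome <;> cases hM : (pvLM diff x).isSome <;> simp_all
  rw [e0, e1, e2]
  have hf0 : fmtChanged (diff.foldl pdStep (PySem.Dict.empty, PySem.Dict.empty)).1
      (diff.foldl pdStep (PySem.Dict.empty, PySem.Dict.empty)).2 = pvF0 diff := by
    funext n
    unfold fmtChanged pvF0
    rw [(dict_link diff n).1, (dict_link diff n).2]
  have hf1 : fmtMinus (diff.foldl pdStep (PySem.Dict.empty, PySem.Dict.empty)).2 = pvF1 diff := by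
    funext n
    unfold fmtMinus pvF1
    rw [(dict_link diff n).2]
  have hf2 : fmtPlus (diff.foldl pdStep (PySem.Dict.empty, PySem.Dict.empty)).1 = pvF2 diff := by
    funext n
    unfold fmtPlus pvF2
    rw [(dict_link diff n).1]
  rw [hf0, hf1, hf2]
  rfl

-- ---------- main equivalence ----------
theorem pretty_diff_eq (diff : List String) : pretty_diff diff = pretty_diff_alt diff :=
  (A_canonical diff).trans (B_canonical diff).symm

-- ===== VERDICT (by name: the statement is the Claim_ definition above) =====
theorem pretty_diff_spec : Claim_equal_pretty_diff := by
  intro diff _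
  unfold Spec_pretty_diff
  exact pretty_diff_eq diff
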